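-- pv_equiv track=rewrite | github.com/chriz2375/my-personal-coding-practice-using-python3 | vowelConsSplits.py | closepath
-- ===== SOURCE A (Python) =====
-- def closepath(num: int) -> int:
--     closedPa = 0
--     oneValues = '0469'
--     numStr = str(num)
--
--     for i in numStr:
--         if i in oneValues:
--             closedPa += 1
--         if i == '8':
--             closedPa += 2
--
--     return closedPa
-- ===== SOURCE B (Python) =====
-- def closepath(num: int) -> int:
--     # Pure integer arithmetic: recurse on abs(num) extracting digits with % and //,
--     # never converting to a string; the minus sign of a negative number holds no loop.
--     def holes(n: int) -> int:
--         d = n % 10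
--         w = (1 if d in (0, 4, 6, 9) else 0) + (2 if d == 8 else 0)
--         return w if n < 10 else w + holes(n // 10)
--     return holes(abs(num))
-- ===== Notes on version B (the rewrite author's own statement) =====
-- stated objective: alternative
-- what changed: Replaces A's scan over the decimal string str(num) by a recursion on the integer itself, extracting digits arithmetically with % 10 and // 10 on abs(num) and never building a string.
import Mathlib
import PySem

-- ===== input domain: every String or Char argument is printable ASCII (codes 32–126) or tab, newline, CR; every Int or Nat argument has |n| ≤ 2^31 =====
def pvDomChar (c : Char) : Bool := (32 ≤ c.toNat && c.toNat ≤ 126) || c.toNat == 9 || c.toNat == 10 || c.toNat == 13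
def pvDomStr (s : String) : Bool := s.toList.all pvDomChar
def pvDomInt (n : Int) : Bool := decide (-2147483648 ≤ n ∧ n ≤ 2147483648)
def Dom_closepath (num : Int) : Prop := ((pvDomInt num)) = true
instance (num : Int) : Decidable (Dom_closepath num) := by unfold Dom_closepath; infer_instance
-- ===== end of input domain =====

-- B replaces A's scan over the decimal string str(num) by a recursion on the integer
-- itself, extracting digits with % 10 and // 10 on abs(num); no string is built.

-- ===== PORT A =====
-- literal transliteration of A: accumulator loop over str(num) with two sequential ifs
def closepath (num : Int) : Int :=
  let oneValues : List Char := "0469".toList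
  let numStr : List Char := (PySem.Int.toStr num).toList
  numStr.foldl (fun closedPa i =>
    let c1 := if PySem.Chars.isIn [i] oneValues then closedPa + 1 else closedPa
    if i == '8' then c1 + 2 else c1) 0

-- ===== PORT B =====
-- B's helper holes(n): recursion on the nonnegative integer, digits via % 10 and // 10
def closepathHoles (n : Nat) : Int :=
  let d := n % 10
  let w : Int := (if d = 0 ∨ d = 4 ∨ d = 6 ∨ d = 9 then 1 else 0) + (if d = 8 then 2 else 0)
  if n < 10 then w else w + closepathHoles (n / 10)
decreasing_by exact Nat.div_lt_self (by omega) (by omega)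

def closepath_alt (num : Int) : Int := closepathHoles num.natAbs

-- ===== PRECONDITION & SPEC =====
def Spec_closepath (num : Int) (out : Int) : Prop := out = closepath_alt num
instance (num : Int) (out : Int) : Decidable (Spec_closepath num out) := by unfold Spec_closepath; infer_instance

-- ===== CLAIM (what is proved, stated in full; the proofs are below) =====
def Claim_equal_closepath : Prop := ∀ (num : Int), Dom_closepath num → Spec_closepath num (closepath num)

-- ===== LEMMAS AND PROOFS =====

-- A's loop body, named so the lemmas can speak about it
def pvStepA (closedPa : Int) (i : Char) : Int :=
  let c1 := if PySem.Chars.isIn [i] ("0469".toList) then closedPa + 1 else closedPa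
  if i == '8' then c1 + 2 else c1

-- the per-digit weight B computes, as a function of the digit value
def pvW (d : Nat) : Int :=
  (if d = 0 ∨ d = 4 ∨ d = 6 ∨ d = 9 then 1 else 0) + (if d = 8 then 2 else 0)

theorem pvStepA_digit (d : Nat) (hd : d < 10) (acc : Int) :
    pvStepA acc (Nat.digitChar d) = acc + pvW d := by
  interval_cases d <;> simp [pvStepA, pvW, PySem.Chars.isIn] <;> rfl

theorem pvStepA_minus (acc : Int) : pvStepA acc '-' = acc := by
  have h : PySem.Chars.isIn ['-'] ['0', '4', '6', '9'] = false := by decide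
  simp [pvStepA, h]

theorem pvHoles_eq (n : Nat) :
    closepathHoles n = pvW (n % 10) + (if n < 10 then 0 else closepathHoles (n / 10)) := by
  rw [closepathHoles]
  by_cases h : n < 10 <;> simp [pvW, h]

-- A's fold over the decimal digits of n equals B's arithmetic recursion
theorem pvFold_toDigits (n : Nat) (acc : Int) :
    (Nat.toDigits 10 n).foldl pvStepA acc = acc + closepathHoles n := by
  induction n using Nat.strong_induction_on generalizing acc with
  | _ n ih =>
    rw [Nat.toDigits_eq_if (by omega)]
    by_cases h : n < 10
    · rw [if_pos h]
      simp only [List.foldl_cons, List.foldl_nil]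
      rw [pvStepA_digit n h, pvHoles_eq, if_pos h, Nat.mod_eq_of_lt h, add_zero]
    · rw [if_neg h, List.foldl_append]
      rw [ih (n / 10) (Nat.div_lt_self (by omega) (by omega))]
      simp only [List.foldl_cons, List.foldl_nil]
      rw [pvStepA_digit (n % 10) (Nat.mod_lt _ (by omega))]
      rw [pvHoles_eq n, if_neg h]
      ring

-- ===== VERDICT (by name: the statement is the Claim_ definition above) =====
theorem closepath_spec : Claim_equal_closepath := by
  intro num _
  unfold Spec_closepath closepath closepath_alt
  show ((PySem.Int.toStr num).toList).foldl pvStepA 0 = closepathHoles num.natAbs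
  rw [PySem.Int.toList_toStr]
  unfold PySem.Int.toChars
  by_cases h : num < 0
  · rw [if_pos h]
    simp only [List.foldl_cons]
    rw [pvStepA_minus, pvFold_toDigits, zero_add]
  · rw [if_neg h]
    rw [pvFold_toDigits, zero_add]
    congr 1
    omega
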